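-- pv_equiv track=rewrite | github.com/IAIK/Chestnut | Binalyzer/syscalls_arm.py | recursive_imm_lookup
-- ===== SOURCE A (Python) =====
-- def recursive_imm_lookup(rset, r):
--     if r in rset:
--         if rset[r]["type"] == "value":
--             return {"type": "value", "value": rset[r]["value"]}
--         else:
--             return recursive_imm_lookup(rset, rset[r]["value"])
--     else:
--         return {"type": "register", "value": r}
-- ===== SOURCE B (Python) =====
-- def recursive_imm_lookup(rset, r):
--     current = r
--     while current in rset and rset[current]["type"] != "value":
--         current = rset[current]["value"]
--     if current in rset:
--         return {"type": "value", "value": rset[current]["value"]}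
--     return {"type": "register", "value": current}
-- ===== Notes on version B (the rewrite author's own statement) =====
-- stated objective: idiomatic
-- what changed: Replaces the tail recursion that rebuilds the result at every level with an iterative while loop that only tracks the current register name and builds the result dict once after the loop.
import Mathlib
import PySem

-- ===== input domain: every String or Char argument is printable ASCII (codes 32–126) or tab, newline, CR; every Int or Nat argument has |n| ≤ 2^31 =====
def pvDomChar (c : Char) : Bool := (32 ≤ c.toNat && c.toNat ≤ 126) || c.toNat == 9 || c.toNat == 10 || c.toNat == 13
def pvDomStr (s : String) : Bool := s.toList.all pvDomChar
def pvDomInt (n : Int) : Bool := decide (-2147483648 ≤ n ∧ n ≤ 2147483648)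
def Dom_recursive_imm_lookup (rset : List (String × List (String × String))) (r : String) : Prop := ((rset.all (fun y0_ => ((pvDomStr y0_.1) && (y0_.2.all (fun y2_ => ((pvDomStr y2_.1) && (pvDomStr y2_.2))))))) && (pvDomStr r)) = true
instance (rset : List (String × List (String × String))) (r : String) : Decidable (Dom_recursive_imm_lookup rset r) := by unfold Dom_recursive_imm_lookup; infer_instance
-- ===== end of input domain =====

-- B replaces A's tail recursion (which rebuilds the result dict at every level) with a while loop
-- tracking only the current register name, building the result once after the loop (idiomatic).


-- ===== PORT A =====
-- 'd[k]' on the association-list dict (first match, as PySem.Dict)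
def pvGetA (d : List (String × String)) (k : String) : Option String :=
  (PySem.Dict.mk d).get? k

-- A's recursion, with fuel (rset.length + 1 suffices: a terminating chain never revisits a key).
-- When fuel runs out, or a chain entry lacks "type"/"value" (Python raises KeyError), returns [] — excluded by Pre_.
def recursive_imm_lookup_go (rset : List (String × List (String × String))) : Nat → String → List (String × String)
  | 0, _ => []
  | fuel + 1, r =>
    match (PySem.Dict.mk rset).get? r with
    | some entry =>
      match pvGetA entry "type", pvGetA entry "value" with
      | some t, some v =>
        if t = "value" then [("type", "value"), ("value", v)]
        else recursive_imm_lookup_go rset fuel v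
      | _, _ => []
    | none => [("type", "register"), ("value", r)]

def recursive_imm_lookup (rset : List (String × List (String × String))) (r : String) : List (String × String) :=
  recursive_imm_lookup_go rset (rset.length + 1) r

-- ===== PORT B =====
-- B's while loop: skip register aliases, returning the final name of the chain (fuel as above).
def pvChase (rset : List (String × List (String × String))) : Nat → String → String
  | 0, current => current
  | fuel + 1, current =>
    match (PySem.Dict.mk rset).get? current with
    | some entry =>
      if (PySem.Dict.mk entry).getD "type" "" ≠ "value" then
        pvChase rset fuel ((PySem.Dict.mk entry).getD "value" "")
      else current
    | none => current

def recursive_imm_lookup_alt (rset : List (String × List (String × String))) (r : String) : List (String × String) :=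
  let fin := pvChase rset (rset.length + 1) r
  match (PySem.Dict.mk rset).get? fin with
  | some entry => [("type", "value"), ("value", (PySem.Dict.mk entry).getD "value" "")]
  | none => [("type", "register"), ("value", fin)]

-- ===== PRECONDITION & SPEC =====
-- the reference chain from k ends (outside rset, or at a "value" entry) within the given fuel,
-- and every chain entry carries both the "type" and the "value" key
def pvChainOk (rset : List (String × List (String × String))) : Nat → String → Bool
  | 0, _ => false
  | fuel + 1, k =>
    match (PySem.Dict.mk rset).get? k with
    | some entry =>
      match pvGetA entry "type", pvGetA entry "value" with
      | some t, some v => if t = "value" then true else pvChainOk rset fuel v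
      | _, _ => false
    | none => true

-- Pre_ excludes exactly the inputs where A raises: cyclic register-reference chains (RecursionError;
-- a terminating chain visits each of the ≤ rset.length keys at most once, so fuel rset.length + 1 is exact)
-- and chains reaching an entry without a "type" or "value" key (KeyError).
def Pre_recursive_imm_lookup (rset : List (String × List (String × String))) (r : String) : Prop :=
  pvChainOk rset (rset.length + 1) r = true
instance (rset : List (String × List (String × String))) (r : String) : Decidable (Pre_recursive_imm_lookup rset r) := by unfold Pre_recursive_imm_lookup; infer_instance

def pvWitness_recursive_imm_lookup : (List (String × List (String × String))) × String :=
  ([("r1", [("type", "register"), ("value", "r2")]), ("r2", [("type", "value"), ("value", "42")])], "r1")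

def Spec_recursive_imm_lookup (rset : List (String × List (String × String))) (r : String) (out : List (String × String)) : Prop := out = recursive_imm_lookup_alt rset r
instance (rset : List (String × List (String × String))) (r : String) (out : List (String × String)) : Decidable (Spec_recursive_imm_lookup rset r out) := by unfold Spec_recursive_imm_lookup; infer_instance

-- ===== CLAIM (what is proved, stated in full; the proofs are below) =====
def Claim_equal_recursive_imm_lookup : Prop := ∀ (rset : List (String × List (String × String))) (r : String), Dom_recursive_imm_lookup rset r → Pre_recursive_imm_lookup rset r → Spec_recursive_imm_lookup rset r (recursive_imm_lookup rset r)

-- ===== LEMMAS AND PROOFS =====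

-- the final form of B, parameterised by the fuel of its loop
def pvFinish (rset : List (String × List (String × String))) (fuel : Nat) (r : String) : List (String × String) :=
  match (PySem.Dict.mk rset).get? (pvChase rset fuel r) with
  | some entry => [("type", "value"), ("value", (PySem.Dict.mk entry).getD "value" "")]
  | none => [("type", "register"), ("value", pvChase rset fuel r)]

theorem pv_go_eq_finish (rset : List (String × List (String × String))) :
    ∀ (fuel : Nat) (r : String), pvChainOk rset fuel r = true →
      recursive_imm_lookup_go rset fuel r = pvFinish rset fuel r := by
  intro fuel
  induction fuel with
  | zero => intro r h; simp [pvChainOk] at h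
  | succ n ih =>
    intro r h
    simp only [pvChainOk] at h
    simp only [recursive_imm_lookup_go, pvFinish, pvChase]
    cases hget : (PySem.Dict.mk rset).get? r with
    | none => simp [hget]
    | some entry =>
      simp only [hget] at h ⊢
      cases ht : pvGetA entry "type" with
      | none => simp [ht] at h
      | some t =>
        cases hv : pvGetA entry "value" with
        | none => simp [ht, hv] at h
        | some v =>
          simp only [ht, hv] at h ⊢
          have ht' : (PySem.Dict.mk entry).get? "type" = some t := ht
          have hv' : (PySem.Dict.mk entry).get? "value" = some v := hv
          have hgetDt : (PySem.Dict.mk entry).getD "type" "" = t :=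
            PySem.Dict.getD_of_get?_eq_some _ "" ht'
          have hgetDv : (PySem.Dict.mk entry).getD "value" "" = v :=
            PySem.Dict.getD_of_get?_eq_some _ "" hv' 
          by_cases hval : t = "value"
          · simp [hval, hgetDt, hget, hgetDv]
          · simp only [if_neg hval] at h ⊢
            rw [ih v h, pvFinish]
            simp [hgetDt, hgetDv, hval]

-- ===== VERDICT (by name: the statement is the Claim_ definition above) =====
theorem recursive_imm_lookup_spec : Claim_equal_recursive_imm_lookup := by
  intro rset r _ hpre
  show recursive_imm_lookup rset r = recursive_imm_lookup_alt rset r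
  rw [recursive_imm_lookup, recursive_imm_lookup_alt,
    pv_go_eq_finish rset (rset.length + 1) r hpre, pvFinish]
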